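-- pv_equiv track=rewrite | github.com/spikerheado1234/triton-fun | SPLAT/acsr_helpers.py | create_causal_windowed_mask
-- ===== SOURCE A (Python) =====
-- def create_causal_windowed_mask(s : int, p : int) -> list[list[int]]:
--     mask = [[0 for _ in range(s)] for _ in range(s)]
--
--     for i in range(s):
--         for j in range(s):
--             if i-p <= j and j <= i+p:
--                 if i >= j:
--                     mask[i][j] = 1
--
--     return mask
-- ===== SOURCE B (Python) =====
-- def create_causal_windowed_mask(s : int, p : int) -> list[list[int]]:
--     result = []
--     for i in range(s):
--         lo = max(0, i - p)
--         if lo <= i: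
--             result.append([0] * lo + [1] * (i - lo + 1) + [0] * (s - 1 - i))
--         else:
--             result.append([0] * s)
--     return result
-- ===== Notes on version B (the rewrite author's own statement) =====
-- stated objective: simpler
-- what changed: B drops the O(s^2) cell-by-cell mutation with nested conditionals and instead assembles each row directly from three closed-form segments [0]*lo + [1]*(i-lo+1) + [0]*(s-1-i) with lo = max(0, i-p).
import Mathlib
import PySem

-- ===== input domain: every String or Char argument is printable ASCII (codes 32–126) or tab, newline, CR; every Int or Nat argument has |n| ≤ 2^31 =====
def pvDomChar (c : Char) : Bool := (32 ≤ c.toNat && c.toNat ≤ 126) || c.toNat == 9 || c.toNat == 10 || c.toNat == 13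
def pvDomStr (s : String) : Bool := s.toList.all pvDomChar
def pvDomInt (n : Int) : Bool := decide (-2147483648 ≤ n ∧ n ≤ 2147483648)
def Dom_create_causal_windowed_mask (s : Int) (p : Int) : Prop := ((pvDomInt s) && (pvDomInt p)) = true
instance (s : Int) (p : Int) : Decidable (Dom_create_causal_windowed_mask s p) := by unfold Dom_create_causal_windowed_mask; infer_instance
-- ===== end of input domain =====

-- B assembles each row from three closed-form replicate segments instead of A's
-- nested per-cell loop with conditionals: a simpler, genuinely different construction.


-- ===== PORT A =====
-- mask[i][j] = 1 (Python's in-place update; indices here are always nonnegative and in range)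
def pvSetRow (m : List (List Int)) (i j : Nat) : List (List Int) :=
  m.set i ((m.getD i []).set j 1)

def create_causal_windowed_mask (s : Int) (p : Int) : List (List Int) :=
  let mask := (PySem.List.pyRange 0 s 1).map (fun _ => (PySem.List.pyRange 0 s 1).map (fun _ => (0 : Int)))
  (PySem.List.pyRange 0 s 1).foldl (fun mask i =>
    (PySem.List.pyRange 0 s 1).foldl (fun mask j =>
      if i - p ≤ j ∧ j ≤ i + p then
        if i ≥ j then pvSetRow mask i.toNat j.toNat else mask
      else mask) mask) mask

-- ===== PORT B =====
-- [0]*a in Python is [] for a < 0; Int.toNat clamps negatives to 0, matching exactly.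
def create_causal_windowed_mask_alt (s : Int) (p : Int) : List (List Int) :=
  (PySem.List.pyRange 0 s 1).map (fun i =>
    let lo := max 0 (i - p)
    if lo ≤ i then
      List.replicate lo.toNat 0 ++ List.replicate (i - lo + 1).toNat 1 ++ List.replicate (s - 1 - i).toNat 0
    else
      List.replicate s.toNat 0)

-- ===== PRECONDITION & SPEC =====
def Spec_create_causal_windowed_mask (s : Int) (p : Int) (out : List (List Int)) : Prop := out = create_causal_windowed_mask_alt s p
instance (s : Int) (p : Int) (out : List (List Int)) : Decidable (Spec_create_causal_windowed_mask s p out) := by unfold Spec_create_causal_windowed_mask; infer_instance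

-- ===== CLAIM (what is proved, stated in full; the proofs are below) =====
def Claim_equal_create_causal_windowed_mask : Prop := ∀ (s : Int) (p : Int), Dom_create_causal_windowed_mask s p → Spec_create_causal_windowed_mask s p (create_causal_windowed_mask s p)

-- ===== LEMMAS AND PROOFS =====

-- The inner j-loop only touches row i: it equals setting row i to a fold over the row alone.
theorem pv_hoist (p i : Int) : ∀ (js : List Int) (m : List (List Int)), i.toNat < m.length →
    js.foldl (fun mask j =>
      if i - p ≤ j ∧ j ≤ i + p then
        if i ≥ j then pvSetRow mask i.toNat j.toNat else mask
      else mask) m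
    = m.set i.toNat (js.foldl (fun r j =>
        if (i - p ≤ j ∧ j ≤ i + p) ∧ i ≥ j then r.set j.toNat 1 else r) (m.getD i.toNat [])) := by
  intro js
  induction js with
  | nil =>
    intro m hm
    rw [List.foldl_nil, List.foldl_nil, List.getD_eq_getElem?_getD]
    simp [List.getElem?_eq_getElem hm]
  | cons j js ih =>
    intro m hm
    rw [List.foldl_cons, List.foldl_cons]
    by_cases hc : (i - p ≤ j ∧ j ≤ i + p) ∧ i ≥ j
    · rw [if_pos hc]
      have hbody : (if i - p ≤ j ∧ j ≤ i + p then
          if i ≥ j then pvSetRow m i.toNat j.toNat else m else m) = pvSetRow m i.toNat j.toNat := by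
        rw [if_pos hc.1, if_pos hc.2]
      rw [hbody]
      rw [ih _ (by simp [pvSetRow, hm])]
      show (List.set m i.toNat _).set i.toNat _ = _
      rw [List.set_set]
      congr 1
      show List.foldl _ ((pvSetRow m i.toNat j.toNat).getD i.toNat []) js = _
      congr 1
      unfold pvSetRow
      rw [List.getD_eq_getElem?_getD, List.getElem?_set_self (by omega)]
      rfl
    · rw [if_neg hc]
      have hbody : (if i - p ≤ j ∧ j ≤ i + p then
          if i ≥ j then pvSetRow m i.toNat j.toNat else m else m) = m := by
        by_cases h1 : i - p ≤ j ∧ j ≤ i + p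
        · rw [if_pos h1, if_neg (fun h => hc ⟨h1, h⟩)]
        · rw [if_neg h1]
      rw [hbody, ih _ hm]

-- Elementwise value of the row fold.
theorem pv_rowget (C : Int → Prop) [DecidablePred C] :
    ∀ (js : List Int) (r : List Int) (k : Nat), (∀ j ∈ js, 0 ≤ j) →
    (js.foldl (fun r j => if C j then r.set j.toNat 1 else r) r)[k]?
      = if (k : Int) ∈ js ∧ C k ∧ k < r.length then some 1 else r[k]? := by
  intro js
  induction js with
  | nil => intro r k _; simp
  | cons j js ih =>
    intro r k h0
    have hj0 : 0 ≤ j := h0 j (by simp)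
    have htail : ∀ x ∈ js, 0 ≤ x := fun x hx => h0 x (by simp [hx])
    rw [List.foldl_cons]
    by_cases hCj : C j
    · rw [if_pos hCj, ih _ k htail, List.length_set]
      by_cases hk_lt : k < r.length
      · by_cases hCk : C (k : Int)
        · by_cases hmem : (k : Int) ∈ js
          · rw [if_pos (⟨hmem, hCk, hk_lt⟩ : _ ∧ _ ∧ _),
              if_pos (⟨List.mem_cons_of_mem _ hmem, hCk, hk_lt⟩ : _ ∧ _ ∧ _)]
          · have hA : ¬ ((k:Int) ∈ js ∧ C (k:Int) ∧ k < r.length) := fun h => hmem h.1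
            by_cases hkj : (k : Int) = j
            · have hB : (k:Int) ∈ j :: js ∧ C (k:Int) ∧ k < r.length :=
                ⟨by simp [hkj], hCk, hk_lt⟩
              rw [if_neg hA, if_pos hB, List.getElem?_set,
                if_pos (show j.toNat = k by omega), if_pos (show j.toNat < r.length by omega)]
            · have hB : ¬ ((k:Int) ∈ j :: js ∧ C (k:Int) ∧ k < r.length) :=
                fun h => (List.mem_cons.mp h.1).elim hkj hmem
              rw [if_neg hA, if_neg hB, List.getElem?_set,
                if_neg (show ¬ j.toNat = k by omega)]
        · have hA : ¬ ((k:Int) ∈ js ∧ C (k:Int) ∧ k < r.length) := fun h => hCk h.2.1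
          have hB : ¬ ((k:Int) ∈ j :: js ∧ C (k:Int) ∧ k < r.length) := fun h => hCk h.2.1
          have hkj : ¬ j.toNat = k := fun h => hCk (by rw [show (k:Int) = j by omega]; exact hCj)
          rw [if_neg hA, if_neg hB, List.getElem?_set, if_neg hkj]
      · have hA : ¬ ((k:Int) ∈ js ∧ C (k:Int) ∧ k < r.length) := fun h => hk_lt h.2.2
        have hB : ¬ ((k:Int) ∈ j :: js ∧ C (k:Int) ∧ k < r.length) := fun h => hk_lt h.2.2
        rw [if_neg hA, if_neg hB,
          List.getElem?_eq_none (show (r.set j.toNat 1).length ≤ k by rw [List.length_set]; omega),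
          List.getElem?_eq_none (show r.length ≤ k by omega)]
    · rw [if_neg hCj, ih _ k htail]
      by_cases hkj : (k : Int) = j
      · have hCk : ¬ C (k : Int) := by rw [hkj]; exact hCj
        have hA : ¬ ((k:Int) ∈ js ∧ C (k:Int) ∧ k < r.length) := fun h => hCk h.2.1
        have hB : ¬ ((k:Int) ∈ j :: js ∧ C (k:Int) ∧ k < r.length) := fun h => hCk h.2.1
        rw [if_neg hA, if_neg hB]
      · by_cases hc : (k : Int) ∈ js ∧ C (k:Int) ∧ k < r.length
        · rw [if_pos hc, if_pos (⟨List.mem_cons_of_mem _ hc.1, hc.2⟩ : _ ∧ _)]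
        · have hB : ¬ ((k:Int) ∈ j :: js ∧ C (k:Int) ∧ k < r.length) :=
            fun h => hc ⟨(List.mem_cons.mp h.1).resolve_left hkj, h.2⟩
          rw [if_neg hc, if_neg hB]

-- A's fold over row i of zeros equals B's three-segment row, for 0 ≤ i < s.
theorem pv_row_eq (s p i : Int) (h0 : 0 ≤ i) (hs : i < s) :
    (PySem.List.pyRange 0 s 1).foldl (fun r j =>
        if (i - p ≤ j ∧ j ≤ i + p) ∧ i ≥ j then r.set j.toNat 1 else r)
      ((PySem.List.pyRange 0 s 1).map (fun _ => (0 : Int)))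
    = (if max 0 (i - p) ≤ i then
        List.replicate (max 0 (i - p)).toNat 0 ++ List.replicate (i - max 0 (i - p) + 1).toNat 1
          ++ List.replicate (s - 1 - i).toNat 0
      else List.replicate s.toNat 0) := by
  apply List.ext_getElem?
  intro k
  rw [pv_rowget (fun j => (i - p ≤ j ∧ j ≤ i + p) ∧ i ≥ j) _ _ k
    (fun j hj => (PySem.List.mem_pyRange_one.mp hj).1)]
  have hlen : ((PySem.List.pyRange 0 s 1).map (fun _ => (0 : Int))).length = (s - 0).toNat := by
    simp [PySem.List.length_pyRange_one]
  have hmem : ((k : Int) ∈ PySem.List.pyRange 0 s 1) ↔ (0 ≤ (k : Int) ∧ (k : Int) < s) :=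
    PySem.List.mem_pyRange_one
  have hzget : ∀ (n : Nat), ((PySem.List.pyRange 0 s 1).map (fun _ => (0 : Int)))[n]?
      = if n < (s - 0).toNat then some 0 else none := by
    intro n
    rw [List.getElem?_map, PySem.List.getElem?_pyRange_one]
    by_cases hn : n < (s - 0).toNat
    · rw [if_pos hn, if_pos hn]; rfl
    · rw [if_neg hn, if_neg hn]; rfl
  rw [hlen, hzget]
  by_cases hp : 0 ≤ i - p
  · rw [max_eq_right hp]
    have hlo : i - p ≤ i ↔ 0 ≤ p := by omega
    by_cases hpp : 0 ≤ p
    · rw [if_pos (show i - p ≤ i by omega)]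
      simp only [List.getElem?_append, List.getElem?_replicate, List.length_append,
        List.length_replicate]
      split_ifs <;> first | rfl | (exfalso; simp only [hmem] at *; try omega)
    · rw [if_neg (show ¬ i - p ≤ i by omega)]
      simp only [List.getElem?_replicate]
      split_ifs <;> first | rfl | (exfalso; simp only [hmem] at *; try omega)
  · rw [max_eq_left (by omega)]
    rw [if_pos (show (0:Int) ≤ i from h0)]
    simp only [List.getElem?_append, List.getElem?_replicate, List.length_append,
      List.length_replicate]
    split_ifs <;> first | rfl | (exfalso; simp only [hmem] at *; try omega)

-- helper: read / write at the seam of pre ++ x :: rest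
theorem pv_getD_append_cons (pre rest : List (List Int)) (x : List Int) :
    (pre ++ x :: rest).getD pre.length [] = x := by
  rw [List.getD_eq_getElem _ _ (by simp)]
  simp

theorem pv_set_append_cons (pre rest : List (List Int)) (x y : List Int) :
    (pre ++ x :: rest).set pre.length y = pre ++ y :: rest := by
  rw [List.set_append_right _ _ (le_refl _)]
  simp

-- The outer loop: rows are set left to right, each from the untouched all-zero row.
theorem pv_outer (s p : Int) : ∀ (t : Nat) (a : Int) (pre : List (List Int)), 0 ≤ a →
    pre.length = a.toNat → (s - a).toNat = t →
    (PySem.List.pyRange a s 1).foldl (fun mask i =>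
      (PySem.List.pyRange 0 s 1).foldl (fun mask j =>
        if i - p ≤ j ∧ j ≤ i + p then
          if i ≥ j then pvSetRow mask i.toNat j.toNat else mask
        else mask) mask)
      (pre ++ List.replicate t ((PySem.List.pyRange 0 s 1).map (fun _ => (0 : Int))))
    = pre ++ (PySem.List.pyRange a s 1).map (fun i =>
        (PySem.List.pyRange 0 s 1).foldl (fun r j =>
          if (i - p ≤ j ∧ j ≤ i + p) ∧ i ≥ j then r.set j.toNat 1 else r)
        ((PySem.List.pyRange 0 s 1).map (fun _ => (0 : Int)))) := by
  intro t
  induction t with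
  | zero =>
    intro a pre ha hlen ht
    rw [PySem.List.pyRange_one_eq_nil (show s ≤ a by omega)]
    simp
  | succ t ih =>
    intro a pre ha hlen ht
    have has : a < s := by omega
    rw [PySem.List.pyRange_one_cons has]
    simp only [List.foldl_cons, List.map_cons, List.replicate_succ]
    rw [pv_hoist p a _ _ (by simp; omega)]
    have hgd : (pre ++ ((PySem.List.pyRange 0 s 1).map (fun _ => (0 : Int)))
        :: List.replicate t ((PySem.List.pyRange 0 s 1).map (fun _ => (0 : Int)))).getD a.toNat []
        = (PySem.List.pyRange 0 s 1).map (fun _ => (0 : Int)) := by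
      rw [← hlen]; exact pv_getD_append_cons _ _ _
    rw [hgd, ← hlen, pv_set_append_cons]
    have hstep : ∀ z : List Int,
        pre ++ z :: List.replicate t ((PySem.List.pyRange 0 s 1).map (fun _ => (0 : Int)))
        = (pre ++ [z]) ++ List.replicate t ((PySem.List.pyRange 0 s 1).map (fun _ => (0 : Int))) := by
      intro z; simp
    rw [hstep]
    rw [ih (a + 1) _ (by omega) (by simp [hlen]; omega) (by omega)]
    simp

-- ===== VERDICT (by name: the statement is the Claim_ definition above) =====
theorem create_causal_windowed_mask_spec : Claim_equal_create_causal_windowed_mask := by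
  intro s p _
  unfold Spec_create_causal_windowed_mask create_causal_windowed_mask create_causal_windowed_mask_alt
  have hrep : (PySem.List.pyRange 0 s 1).map
      (fun _ => (PySem.List.pyRange 0 s 1).map (fun _ => (0 : Int)))
      = List.replicate (s - 0).toNat ((PySem.List.pyRange 0 s 1).map (fun _ => (0 : Int))) := by
    rw [List.map_const']
    simp [PySem.List.length_pyRange_one]
  rw [hrep]
  have := pv_outer s p (s - 0).toNat 0 [] (le_refl 0) (by simp) rfl
  simp only [List.nil_append] at this
  rw [this]
  apply List.map_congr_left
  intro i hi
  have hmem := PySem.List.mem_pyRange_one.mp hi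
  exact pv_row_eq s p i hmem.1 hmem.2
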